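-- pv_equiv track=rewrite | github.com/LSDOlab/omtools | omtools/utils/compute_einsum_shape.py | compute_einsum_shape
-- ===== SOURCE A (Python) =====
-- from typing import List, Union, Tuple
--
-- def compute_einsum_shape(
--     operation_aslist: List[str],
--     in_shapes: Union[Tuple[int], List[Tuple[int]]],
-- ):
--     out_shape = []
--     for char in operation_aslist[-1]:
--         i = -1
--         for tensor_rep in operation_aslist[:-1]:
--             i += 1
--             if (char in tensor_rep):
--                 shape_ind = tensor_rep.index(char)
--                 out_shape.append(in_shapes[i][shape_ind])
--                 break
--     return tuple(out_shape)
-- ===== SOURCE B (Python) =====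
-- def compute_einsum_shape(operation_aslist, in_shapes):
--     dim = {}
--     for tensor_rep, shape in zip(operation_aslist[:-1], in_shapes):
--         for ch, size in zip(tensor_rep, shape):
--             if ch not in dim:
--                 dim[ch] = size
--     return tuple(dim[c] for c in operation_aslist[-1] if c in dim)
-- ===== Notes on version B (the rewrite author's own statement) =====
-- stated objective: simpler
-- what changed: B builds a first-wins char-to-dimension dictionary in one pass over the operands zipped with their shapes, then maps the output subscript through it, instead of A's per-output-character rescan of all operands with break and .index.
import Mathlib
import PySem

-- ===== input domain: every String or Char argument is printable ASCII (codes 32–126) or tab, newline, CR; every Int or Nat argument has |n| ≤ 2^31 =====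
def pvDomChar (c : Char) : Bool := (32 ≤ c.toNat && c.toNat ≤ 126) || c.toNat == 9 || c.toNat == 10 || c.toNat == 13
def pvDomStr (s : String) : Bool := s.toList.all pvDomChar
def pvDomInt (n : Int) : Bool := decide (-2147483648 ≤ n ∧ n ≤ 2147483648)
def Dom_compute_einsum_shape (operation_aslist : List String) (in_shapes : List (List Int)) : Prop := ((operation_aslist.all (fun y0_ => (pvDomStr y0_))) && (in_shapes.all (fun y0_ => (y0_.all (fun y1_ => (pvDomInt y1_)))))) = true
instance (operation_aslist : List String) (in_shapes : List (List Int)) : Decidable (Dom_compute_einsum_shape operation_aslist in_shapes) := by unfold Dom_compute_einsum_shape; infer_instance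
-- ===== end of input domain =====

-- B replaces A's per-output-character rescan of all operands (break + .index) by one
-- first-wins dictionary built in a single pass over (operand, shape) pairs; objective: simpler.

-- ===== PORT A =====
-- inner 'for tensor_rep in operation_aslist[:-1]' loop of A, carrying the counter i (starts -1, += 1 first)
def pvAInner (c : Char) (in_shapes : List (List Int)) : Int → List String → List Int → List Int
  | _, [], out => out
  | i, rep :: rest, out =>
    let i := i + 1
    if c ∈ rep.toList then
      out ++ [PySem.List.pyGetD (PySem.List.pyGetD in_shapes i [])
                (((PySem.List.index? rep.toList c).getD 0 : Nat) : Int) 0]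
    else pvAInner c in_shapes i rest out

def compute_einsum_shape (operation_aslist : List String) (in_shapes : List (List Int)) : List Int :=
  ((PySem.List.pyGet? operation_aslist (-1)).getD "").toList.foldl
    (fun out c => pvAInner c in_shapes (-1) (PySem.List.slice operation_aslist none (some (-1))) out) []

-- ===== PORT B =====
-- 'for ch, size in zip(tensor_rep, shape): if ch not in dim: dim[ch] = size'
def pvBRep : List (Char × Int) → PySem.Dict Char Int → PySem.Dict Char Int
  | [], d => d
  | (ch, size) :: rest, d =>
    pvBRep rest (if d.contains ch then d else d.insert ch size)

-- 'for tensor_rep, shape in zip(operation_aslist[:-1], in_shapes)'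
def pvBBuild : List (String × List Int) → PySem.Dict Char Int → PySem.Dict Char Int
  | [], d => d
  | (rep, shape) :: rest, d => pvBBuild rest (pvBRep (rep.toList.zip shape) d)

def compute_einsum_shape_alt (operation_aslist : List String) (in_shapes : List (List Int)) : List Int :=
  let dim := pvBBuild ((PySem.List.slice operation_aslist none (some (-1))).zip in_shapes) PySem.Dict.empty
  ((PySem.List.pyGet? operation_aslist (-1)).getD "").toList.filterMap (fun c => dim.get? c)

-- ===== PRECONDITION & SPEC =====
-- Pre_ holds exactly when A returns (raises nothing): the operand list is nonempty and, for every
-- output character, the first operand containing it has a shape entry at that character's position.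
def Pre_compute_einsum_shape (operation_aslist : List String) (in_shapes : List (List Int)) : Prop :=
  operation_aslist ≠ [] ∧
  ∀ c ∈ ((operation_aslist.getLast?).getD "").toList,
    ∀ i < operation_aslist.dropLast.length,
      c ∈ (operation_aslist.dropLast.getD i "").toList →
      (∀ j < i, c ∉ (operation_aslist.dropLast.getD j "").toList) →
      i < in_shapes.length ∧
        (operation_aslist.dropLast.getD i "").toList.idxOf c < (in_shapes.getD i []).length
-- (the ∀-over-Char quantifier must use List.decidableBAll, not the Fintype-over-all-Chars instance)
instance (operation_aslist : List String) (in_shapes : List (List Int)) : Decidable (Pre_compute_einsum_shape operation_aslist in_shapes) := by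
  unfold Pre_compute_einsum_shape
  exact @instDecidableAnd _ _ _ (List.decidableBAll _ _)

def pvWitness_compute_einsum_shape : List String × List (List Int) := (["ij", "jk", "ik"], [[2, 3], [3, 4]])

def Spec_compute_einsum_shape (operation_aslist : List String) (in_shapes : List (List Int)) (out : List Int) : Prop := out = compute_einsum_shape_alt operation_aslist in_shapes
instance (operation_aslist : List String) (in_shapes : List (List Int)) (out : List Int) : Decidable (Spec_compute_einsum_shape operation_aslist in_shapes out) := by unfold Spec_compute_einsum_shape; infer_instance

-- ===== CLAIM (what is proved, stated in full; the proofs are below) =====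
def Claim_equal_compute_einsum_shape : Prop := ∀ (operation_aslist : List String) (in_shapes : List (List Int)), Dom_compute_einsum_shape operation_aslist in_shapes → Pre_compute_einsum_shape operation_aslist in_shapes → Spec_compute_einsum_shape operation_aslist in_shapes (compute_einsum_shape operation_aslist in_shapes)

-- ===== LEMMAS AND PROOFS =====

-- what A's inner loop computes for character c, scanning reps with the running shape index k
def pvScanA (c : Char) (shapes : List (List Int)) : Nat → List String → Option Int
  | _, [] => none
  | k, rep :: rest =>
    if c ∈ rep.toList then some ((shapes.getD k []).getD (rep.toList.idxOf c) 0)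
    else pvScanA c shapes (k + 1) rest

-- what B's dictionary holds for character c: first (rep, shape) pair whose zip carries c
def pvLook (c : Char) : List (String × List Int) → Option Int
  | [] => none
  | (rep, shape) :: rest =>
    (((rep.toList.zip shape).find? (fun p => p.1 == c)).map (·.2)).or (pvLook c rest)

theorem pv_index?_mem {c : Char} {xs : List Char} (h : c ∈ xs) :
    PySem.List.index? xs c = some (xs.idxOf c) := by
  induction xs with
  | nil => cases h
  | cons x xs ih =>
    by_cases hx : x = c
    · subst hx
      simp [List.idxOf?_cons]
    · have hc : c ∈ xs := by
        rcases List.mem_cons.mp h with h' | h'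
        · exact absurd h'.symm hx
        · exact h'
      rw [PySem.List.index?_cons_of_ne xs hx, ih hc]
      simp [hx]

theorem pvAInner_eq (c : Char) (shapes : List (List Int)) :
    ∀ (reps : List String) (k : Nat) (out : List Int),
      pvAInner c shapes ((k : Int) - 1) reps out =
        out ++ (match pvScanA c shapes k reps with
                | some v => [v]
                | none => []) := by
  intro reps
  induction reps with
  | nil => intro k out; simp [pvAInner, pvScanA]
  | cons rep rest ih =>
    intro k out
    rw [pvAInner]
    by_cases hc : c ∈ rep.toList
    · simp only [hc, if_pos, pvScanA]
      rw [pv_index?_mem hc]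
      have h1 : ((k : Int) - 1) + 1 = ((k : Nat) : Int) := by omega
      rw [h1]
      simp [PySem.List.pyGetD_natCast, List.getD]
    · simp only [hc, if_neg, not_false_iff, pvScanA]
      have h1 : ((k : Int) - 1) + 1 = (((k + 1 : Nat) : Int)) - 1 := by push_cast; omega
      rw [h1, ih (k + 1) out]

theorem pvScanA_drop (c : Char) :
    ∀ (reps : List String) (k : Nat) (shapes : List (List Int)),
      pvScanA c shapes k reps = pvScanA c (shapes.drop k) 0 reps := by
  intro reps
  induction reps with
  | nil => intro k shapes; simp [pvScanA]
  | cons rep rest ih =>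
    intro k shapes
    rw [pvScanA, pvScanA]
    by_cases hc : c ∈ rep.toList
    · simp only [hc, if_pos]
      have : shapes.getD k [] = (shapes.drop k).getD 0 [] := by
        simp [List.getD, List.getElem?_drop]
      rw [this]
    · simp only [hc, if_neg, not_false_iff]
      rw [ih (k + 1) shapes, ih 1 (shapes.drop k), List.drop_drop]

theorem pvFind_zip_none {c : Char} {chars : List Char} (vals : List Int) (h : c ∉ chars) :
    (chars.zip vals).find? (fun p => p.1 == c) = none := by
  apply List.find?_eq_none.mpr
  intro p hp
  have h1 : p.1 ∈ chars := (List.of_mem_zip hp).1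
  simp only [beq_iff_eq]
  intro hpc
  exact h (hpc ▸ h1)

theorem pvFind_zip {c : Char} :
    ∀ (chars : List Char) (vals : List Int), c ∈ chars → chars.idxOf c < vals.length →
      (chars.zip vals).find? (fun p => p.1 == c) = some (c, vals.getD (chars.idxOf c) 0) := by
  intro chars
  induction chars with
  | nil => intro vals h; cases h
  | cons x xs ih =>
    intro vals hmem hlt
    by_cases hx : x = c
    · subst hx
      have h0 : (x :: xs).idxOf x = 0 := by simp
      rw [h0] at hlt ⊢
      cases vals with
      | nil => simp at hlt
      | cons v vs => simp
    · have hc : c ∈ xs := by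
        rcases List.mem_cons.mp hmem with h' | h'
        · exact absurd h'.symm hx
        · exact h'
      have hne : (x == c) = false := beq_eq_false_iff_ne.mpr hx
      have hidx : (x :: xs).idxOf c = xs.idxOf c + 1 := by simp [List.idxOf_cons, hne]
      rw [hidx] at hlt ⊢
      cases vals with
      | nil => simp at hlt
      | cons v vs =>
        have hlt' : xs.idxOf c < vs.length := by simp at hlt; omega
        simp only [List.zip_cons_cons, List.find?, hne, List.getD_cons_succ]
        exact ih vs hc hlt'

theorem pvBRep_get? (x : Char) :
    ∀ (pairs : List (Char × Int)) (d : PySem.Dict Char Int),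
      (pvBRep pairs d).get? x =
        (d.get? x).or ((pairs.find? (fun p => p.1 == x)).map (·.2)) := by
  intro pairs
  induction pairs with
  | nil => intro d; simp [pvBRep]
  | cons p rest ih =>
    intro d
    obtain ⟨ch, size⟩ := p
    rw [pvBRep, ih]
    by_cases hx : x = ch
    · subst hx
      simp only [List.find?, beq_self_eq_true, Option.map_some]
      by_cases hd : d.contains x
      · have hsome : (d.get? x).isSome := by
          rw [← PySem.Dict.contains_eq_isSome_get?]; exact hd
        rcases Option.isSome_iff_exists.mp hsome with ⟨v, hv⟩
        simp [hd, hv]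
      · have hnone : d.get? x = none := by
          have := PySem.Dict.contains_eq_isSome_get? (d := d) (k := x)
          rw [Bool.eq_false_iff.mpr hd] at this
          exact Option.not_isSome_iff_eq_none.mp (by rw [← this]; simp)
        simp [hd, hnone, PySem.Dict.get?_insert_self]
    · have hne : (ch == x) = false := beq_eq_false_iff_ne.mpr (fun h => hx h.symm)
      have hget :
          (if d.contains ch then d else d.insert ch size).get? x = d.get? x := by
        by_cases hd : d.contains ch
        · rw [if_pos hd]
        · rw [if_neg hd]; exact PySem.Dict.get?_insert_of_ne d _ hx
      simp only [List.find?, hne, hget]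

theorem pvBBuild_get? (x : Char) :
    ∀ (pairs : List (String × List Int)) (d : PySem.Dict Char Int),
      (pvBBuild pairs d).get? x = (d.get? x).or (pvLook x pairs) := by
  intro pairs
  induction pairs with
  | nil => intro d; simp [pvBBuild, pvLook]
  | cons p rest ih =>
    intro d
    obtain ⟨rep, shape⟩ := p
    rw [pvBBuild, ih, pvBRep_get? x (rep.toList.zip shape) d, pvLook, Option.or_assoc]

theorem pvMain (c : Char) :
    ∀ (reps : List String) (shapes : List (List Int)),
      (∀ i < reps.length, c ∈ (reps.getD i "").toList →
        (∀ j < i, c ∉ (reps.getD j "").toList) →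
        i < shapes.length ∧ (reps.getD i "").toList.idxOf c < (shapes.getD i []).length) →
      pvScanA c shapes 0 reps = pvLook c (reps.zip shapes) := by
  intro reps
  induction reps with
  | nil => intro shapes _; simp [pvScanA, pvLook]
  | cons rep rest ih =>
    intro shapes Hc
    by_cases hc : c ∈ rep.toList
    · have h0 := Hc 0 (by simp) (by simpa using hc) (by intro j hj; exact absurd hj (Nat.not_lt_zero j))
      rw [List.getD_cons_zero] at h0
      obtain ⟨hlen, hidx⟩ := h0
      cases shapes with
      | nil => simp at hlen
      | cons s ss =>
        simp only [List.getD_cons_zero] at hidx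
        rw [pvScanA, if_pos hc, List.zip_cons_cons, pvLook,
            pvFind_zip rep.toList s hc hidx]
        simp
    · have Hc' : ∀ i < rest.length, c ∈ (rest.getD i "").toList →
          (∀ j < i, c ∉ (rest.getD j "").toList) →
          i < (shapes.drop 1).length ∧
            (rest.getD i "").toList.idxOf c < ((shapes.drop 1).getD i []).length := by
        intro i hi hci hprev
        have h := Hc (i + 1) (by simp; omega)
          (by simpa [List.getD_cons_succ] using hci)
          (by
            intro j hj
            cases j with
            | zero => simpa using hc
            | succ j' =>
              simpa [List.getD_cons_succ] using hprev j' (by omega))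
        obtain ⟨h1, h2⟩ := h
        refine ⟨by simp; omega, ?_⟩
        have hgd : shapes.getD (i + 1) [] = (shapes.drop 1).getD i [] := by
          simp [List.getD]
        rw [← hgd]
        simpa [List.getD_cons_succ] using h2
      rw [pvScanA, if_neg hc, pvScanA_drop c rest 1 shapes, ih (shapes.drop 1) Hc']
      cases shapes with
      | nil => simp
      | cons s ss =>
        rw [List.zip_cons_cons, pvLook, pvFind_zip_none s hc]
        simp

theorem pv_foldl_optappend (g : Char → Option Int) :
    ∀ (cs : List Char) (out : List Int),
      cs.foldl (fun out c => out ++ (match g c with | some v => [v] | none => [])) out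
        = out ++ cs.filterMap g := by
  intro cs
  induction cs with
  | nil => intro out; simp
  | cons c rest ih =>
    intro out
    rw [List.foldl_cons, ih, List.filterMap_cons]
    cases h : g c <;> simp

-- ===== VERDICT (by name: the statement is the Claim_ definition above) =====
theorem compute_einsum_shape_spec : Claim_equal_compute_einsum_shape := by
  intro ops shapes _ hpre
  obtain ⟨hne, hchars⟩ := hpre
  unfold Spec_compute_einsum_shape compute_einsum_shape compute_einsum_shape_alt
  rw [PySem.List.slice_to_neg_one]
  have hbody : ∀ (out : List Int) (c : Char),
      pvAInner c shapes (-1) ops.dropLast out =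
        out ++ (match pvScanA c shapes 0 ops.dropLast with
                | some v => [v] | none => []) := by
    intro out c
    have := pvAInner_eq c shapes ops.dropLast 0 out
    simpa using this
  have hfun : (fun (out : List Int) c => pvAInner c shapes (-1) ops.dropLast out)
      = (fun (out : List Int) c => out ++ (match pvScanA c shapes 0 ops.dropLast with
                                           | some v => [v] | none => [])) := by
    funext out c; exact hbody out c
  rw [hfun, pv_foldl_optappend, List.nil_append]
  apply List.filterMap_congr
  intro c hcmem
  have hcmem' : c ∈ ((ops.getLast?).getD "").toList := by
    rwa [PySem.List.pyGet?_neg_one] at hcmem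
  rw [pvMain c ops.dropLast shapes (hchars c hcmem'),
      pvBBuild_get? c (ops.dropLast.zip shapes) PySem.Dict.empty]
  simp [PySem.Dict.get?_empty]
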